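-- pv_equiv track=rewrite | github.com/Laplace0826/Auto_Fanout | base_function.py | remove_not_this_layer_obs
-- ===== SOURCE A (Python) =====
-- def remove_not_this_layer_obs(data_obs_stat,layer):
--     clear=0
--     while clear==0:
--         clear=1
--         for i in range(len(data_obs_stat)):
--             if int(data_obs_stat[i][0])!= layer:
--                 del data_obs_stat[i]
--                 clear=0
--                 break
--     return data_obs_stat
-- ===== SOURCE B (Python) =====
-- def remove_not_this_layer_obs(data_obs_stat, layer):
--     data_obs_stat[:] = [row for row in data_obs_stat if int(row[0]) == layer]
--     return data_obs_stat
-- ===== Notes on version B (the rewrite author's own statement) =====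
-- stated objective: simpler
-- what changed: Replaces the restart-flag nested scan-and-delete-one loop with a single filtering comprehension assigned back in place via slice assignment.
import Mathlib
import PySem

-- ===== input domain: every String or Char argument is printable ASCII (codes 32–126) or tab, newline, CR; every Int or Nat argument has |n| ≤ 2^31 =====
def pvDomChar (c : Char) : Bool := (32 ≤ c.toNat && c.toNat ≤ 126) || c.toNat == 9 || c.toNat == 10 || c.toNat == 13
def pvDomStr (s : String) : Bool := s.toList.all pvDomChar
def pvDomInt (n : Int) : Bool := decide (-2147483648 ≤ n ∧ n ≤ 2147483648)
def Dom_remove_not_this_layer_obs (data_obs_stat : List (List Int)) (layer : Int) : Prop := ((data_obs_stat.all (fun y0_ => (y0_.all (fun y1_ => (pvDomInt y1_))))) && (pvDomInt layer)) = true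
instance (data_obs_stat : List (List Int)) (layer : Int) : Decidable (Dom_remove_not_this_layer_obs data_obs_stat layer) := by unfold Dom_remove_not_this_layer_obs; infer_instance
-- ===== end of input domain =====

-- B replaces A's restart-flag scan-and-delete-one loop with a single in-place filtering
-- comprehension (slice assignment); equivalence is about the returned value (both mutate
-- the argument, B leaves it in the same final state).


-- ===== PORT A =====
-- the inner `for i in range(len(..))` loop: scan left to right, delete the FIRST row whose
-- head ≠ layer (returning `some` of the shortened list and modelling `break`), or `none`
-- if the scan finishes without a deletion (clear stays 1).  `data_obs_stat[i][0]` on an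
-- empty row raises IndexError (excluded by Pre_); pyGet? = none there, treated as no match
-- so the port still totalises.
def pvBad (layer : Int) (r : List Int) : Bool :=
  match PySem.List.pyGet? r 0 with
  | some v => v != layer
  | none => false

def pvDelFirstBad (layer : Int) : List (List Int) → Option (List (List Int))
  | [] => none
  | r :: rest =>
    if pvBad layer r then some rest
    else match pvDelFirstBad layer rest with
      | some rest' => some (r :: rest')
      | none => none

theorem pvDelFirstBad_length (layer : Int) : ∀ (xs ys : List (List Int)),
    pvDelFirstBad layer xs = some ys → ys.length < xs.length := by
  intro xs
  induction xs with
  | nil => intro ys h; simp [pvDelFirstBad] at h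
  | cons r rest ih =>
    intro ys h
    simp only [pvDelFirstBad] at h
    split at h
    · cases h; simp
    · cases hrec : pvDelFirstBad layer rest with
      | none => rw [hrec] at h; cases h
      | some rest' =>
        rw [hrec] at h; cases h
        have := ih rest' hrec
        simpa using Nat.succ_lt_succ this

-- the outer `while clear==0` loop: repeat the scan until no deletion happens
def remove_not_this_layer_obs (data_obs_stat : List (List Int)) (layer : Int) : List (List Int) :=
  match h : pvDelFirstBad layer data_obs_stat with
  | some xs' => remove_not_this_layer_obs xs' layer
  | none => data_obs_stat
termination_by data_obs_stat.length
decreasing_by exact pvDelFirstBad_length layer data_obs_stat xs' h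

-- ===== PORT B =====
-- [row for row in data_obs_stat if int(row[0]) == layer]
def remove_not_this_layer_obs_alt (data_obs_stat : List (List Int)) (layer : Int) : List (List Int) :=
  data_obs_stat.filter (fun row => PySem.List.pyGet? row 0 == some layer)

-- ===== PRECONDITION & SPEC =====
-- Pre_ excludes inputs containing an empty row: there `row[0]` raises IndexError in both A and B.
def Pre_remove_not_this_layer_obs (data_obs_stat : List (List Int)) (layer : Int) : Prop :=
  ∀ row ∈ data_obs_stat, row ≠ []
instance (data_obs_stat : List (List Int)) (layer : Int) : Decidable (Pre_remove_not_this_layer_obs data_obs_stat layer) := by unfold Pre_remove_not_this_layer_obs; infer_instance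

def pvWitness_remove_not_this_layer_obs : List (List Int) × Int := ([[1, 5], [2, 7], [1, 9]], 1)

def Spec_remove_not_this_layer_obs (data_obs_stat : List (List Int)) (layer : Int) (out : List (List Int)) : Prop := out = remove_not_this_layer_obs_alt data_obs_stat layer
instance (data_obs_stat : List (List Int)) (layer : Int) (out : List (List Int)) : Decidable (Spec_remove_not_this_layer_obs data_obs_stat layer out) := by unfold Spec_remove_not_this_layer_obs; infer_instance

-- ===== CLAIM (what is proved, stated in full; the proofs are below) =====
def Claim_equal_remove_not_this_layer_obs : Prop := ∀ (data_obs_stat : List (List Int)) (layer : Int), Dom_remove_not_this_layer_obs data_obs_stat layer → Pre_remove_not_this_layer_obs data_obs_stat layer → Spec_remove_not_this_layer_obs data_obs_stat layer (remove_not_this_layer_obs data_obs_stat layer)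

-- ===== LEMMAS AND PROOFS =====

theorem remove_eq (layer : Int) (xs : List (List Int)) :
    remove_not_this_layer_obs xs layer =
      match pvDelFirstBad layer xs with
      | some xs' => remove_not_this_layer_obs xs' layer
      | none => xs := by
  rw [remove_not_this_layer_obs]
  cases hd : pvDelFirstBad layer xs <;> rfl


-- on a nonempty row, pyGet? at 0 is the head
theorem pvGet0_cons (a : Int) (r : List Int) : PySem.List.pyGet? (a :: r) 0 = some a := by
  simp [PySem.List.pyGet?, PySem.List.pyIdx?]

-- when the scan deletes nothing, every row (all nonempty) has head = layer, so filter keeps all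
theorem pvDelFirstBad_none (layer : Int) : ∀ (xs : List (List Int)),
    (∀ row ∈ xs, row ≠ []) → pvDelFirstBad layer xs = none →
    remove_not_this_layer_obs_alt xs layer = xs := by
  intro xs
  induction xs with
  | nil => intro _ _; rfl
  | cons r rest ih =>
    intro hne h
    simp only [pvDelFirstBad] at h
    split at h
    · cases h
    · rename_i hcond
      cases hrest : pvDelFirstBad layer rest with
      | some rest' => rw [hrest] at h; cases h
      | none =>
        obtain ⟨a, r', rfl⟩ : ∃ a r', r = a :: r' := by
          cases r with
          | nil => exact absurd rfl (hne _ (by simp))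
          | cons a r' => exact ⟨a, r', rfl⟩
        have ha : a = layer := by
          simp [pvBad] at hcond
          exact hcond
        subst ha
        have := ih (fun row hrow => hne row (by simp [hrow])) hrest
        simp only [remove_not_this_layer_obs_alt] at this ⊢
        simp [this]

-- deleting a bad row does not change the filter, and preserves nonemptiness of rows
theorem pvDelFirstBad_some (layer : Int) : ∀ (xs ys : List (List Int)),
    (∀ row ∈ xs, row ≠ []) → pvDelFirstBad layer xs = some ys →
    remove_not_this_layer_obs_alt ys layer = remove_not_this_layer_obs_alt xs layer
      ∧ (∀ row ∈ ys, row ≠ []) := by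
  intro xs
  induction xs with
  | nil => intro ys _ h; simp [pvDelFirstBad] at h
  | cons r rest ih =>
    intro ys hne h
    simp only [pvDelFirstBad] at h
    split at h
    · rename_i hcond
      cases h
      obtain ⟨a, r', rfl⟩ : ∃ a r', r = a :: r' := by
        cases r with
        | nil => exact absurd rfl (hne _ (by simp))
        | cons a r' => exact ⟨a, r', rfl⟩
      have hv : ¬ (a = layer) := by
        simpa [pvBad, pvGet0_cons] using hcond
      refine ⟨?_, fun row hrow => hne row (by simp [hrow])⟩
      simp only [remove_not_this_layer_obs_alt, List.filter_cons]
      rw [if_neg (by simp [hv])]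
    · cases hrest : pvDelFirstBad layer rest with
      | none => rw [hrest] at h; cases h
      | some rest' =>
        rw [hrest] at h; cases h
        obtain ⟨heq, hne'⟩ := ih rest' (fun row hrow => hne row (by simp [hrow])) hrest
        refine ⟨?_, ?_⟩
        · simp only [remove_not_this_layer_obs_alt, List.filter_cons] at heq ⊢
          rw [heq]
        · intro row hrow
          rcases List.mem_cons.mp hrow with h1 | h2
          · exact h1 ▸ hne r (by simp)
          · exact hne' row h2

theorem pvMain (layer : Int) : ∀ (xs : List (List Int)),
    (∀ row ∈ xs, row ≠ []) →
    remove_not_this_layer_obs xs layer = remove_not_this_layer_obs_alt xs layer := by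
  intro xs
  induction hx : xs.length using Nat.strong_induction_on generalizing xs with
  | _ n ih =>
    intro hne
    cases h : pvDelFirstBad layer xs with
    | none => rw [remove_eq, h]; exact (pvDelFirstBad_none layer xs hne h).symm
    | some ys =>
      obtain ⟨heq, hne'⟩ := pvDelFirstBad_some layer xs ys hne h
      have hlt := pvDelFirstBad_length layer xs ys h
      rw [remove_eq, h]
      exact (ih ys.length (hx ▸ hlt) ys rfl hne').trans heq

-- ===== VERDICT (by name: the statement is the Claim_ definition above) =====
theorem remove_not_this_layer_obs_spec : Claim_equal_remove_not_this_layer_obs := by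
  intro xs layer _ hpre
  unfold Spec_remove_not_this_layer_obs
  exact pvMain layer xs hpre
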